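-- pv_equiv track=rewrite | github.com/ruxi22/Bioinformatics | ex2_Lab6.py | digest_ecori
-- ===== SOURCE A (Python) =====
-- ECO_RI = "GAATTC"
--
-- def digest_ecori(seq):
--     """
--     Cut DNA sequence at EcoRI (GAATTC).
--     Return list of fragment lengths (bp).
--     """
--     cut = ECO_RI
--     cut_len = len(cut)
--     positions = []
--     i = seq.find(cut)
--     while i != -1:
--         positions.append(i)
--         i = seq.find(cut, i + 1)
--
--     if not positions:
--         return [len(seq)]
--
--     frags = []
--     start = 0
--     for pos in positions:
--         frags.append(pos - start)
--         start = pos + cut_len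
--     frags.append(len(seq) - start)
--     return [f for f in frags if f > 0]
-- ===== SOURCE B (Python) =====
-- ECO_RI = "GAATTC"
--
-- def digest_ecori(seq):
--     """
--     Cut DNA sequence at EcoRI (GAATTC).
--     Return list of fragment lengths (bp).
--     """
--     parts = seq.split(ECO_RI)
--     if len(parts) == 1:
--         return [len(seq)]
--     return [len(p) for p in parts if len(p) > 0]
-- ===== Notes on version B (the rewrite author's own statement) =====
-- stated objective: simpler
-- what changed: Replaces the explicit find-loop collecting cut positions plus the start/differencing pass by a single str.split on the recognition site, returning the lengths of the non-empty pieces (no-site case special-cased to [len(seq)]).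
import Mathlib
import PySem

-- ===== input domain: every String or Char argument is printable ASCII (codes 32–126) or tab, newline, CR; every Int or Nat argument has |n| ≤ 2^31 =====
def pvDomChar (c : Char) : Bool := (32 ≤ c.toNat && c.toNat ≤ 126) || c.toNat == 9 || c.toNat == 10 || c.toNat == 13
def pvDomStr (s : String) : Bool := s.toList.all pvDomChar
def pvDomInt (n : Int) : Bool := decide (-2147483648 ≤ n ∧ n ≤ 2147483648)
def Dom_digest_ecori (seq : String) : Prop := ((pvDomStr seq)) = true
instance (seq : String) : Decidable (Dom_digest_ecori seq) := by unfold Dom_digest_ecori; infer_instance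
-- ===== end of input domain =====

-- B replaces A's find-loop + position-differencing pass by one split on the site; objective: simpler.

-- ===== PORT A =====
-- the `while i != -1` loop collecting match positions; fuel only makes the loop total
-- (each step the search start strictly grows, so s.length + 1 steps always suffice)
def pvPosLoop (fuel : Nat) (s cut : List Char) (i : Int) (acc : List Int) : List Int :=
  match fuel with
  | 0 => acc
  | fuel + 1 =>
    if i = -1 then acc
    else pvPosLoop fuel s cut (PySem.Chars.findFrom s cut (i + 1)) (acc ++ [i])

def digest_ecori (seq : String) : List Int :=
  let s := seq.toList
  let cut := "GAATTC".toList
  let cutLen : Int := cut.length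
  let positions := pvPosLoop (s.length + 1) s cut (PySem.Chars.find s cut) []
  if positions.isEmpty then [(s.length : Int)]
  else
    let p := positions.foldl (fun st pos => (st.1 ++ [pos - st.2], pos + cutLen)) (([] : List Int), (0 : Int))
    let frags := p.1 ++ [(s.length : Int) - p.2]
    frags.filter (fun f => decide (0 < f))

-- ===== PORT B =====
def digest_ecori_alt (seq : String) : List Int :=
  let parts := PySem.Chars.splitOn seq.toList "GAATTC".toList
  if parts.length = 1 then [(seq.toList.length : Int)]
  else (parts.filter (fun p => decide (0 < p.length))).map (fun p => (p.length : Int))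

-- ===== PRECONDITION & SPEC =====
def Spec_digest_ecori (seq : String) (out : List Int) : Prop := out = digest_ecori_alt seq
instance (seq : String) (out : List Int) : Decidable (Spec_digest_ecori seq out) := by unfold Spec_digest_ecori; infer_instance

-- ===== CLAIM (what is proved, stated in full; the proofs are below) =====
def Claim_equal_digest_ecori : Prop := ∀ (seq : String), Dom_digest_ecori seq → Spec_digest_ecori seq (digest_ecori seq)

-- ===== LEMMAS AND PROOFS =====

def pvC : List Char := "GAATTC".toList

theorem pvC_lit : pvC = ['G', 'A', 'A', 'T', 'T', 'C'] := by decide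

theorem pvC_len : pvC.length = 6 := by decide

theorem pv_occ_len_le {s : List Char} {i : Nat} (h : pvC <+: s.drop i) : i + 6 ≤ s.length := by
  have h1 := h.length_le
  rw [List.length_drop, pvC_len] at h1
  omega

theorem pv_no_occ_iff {s : List Char} :
    PySem.Chars.find s pvC = -1 ↔ ∀ j, ¬ pvC <+: s.drop j := by
  rw [PySem.Chars.find_eq_neg_one_iff, ← PySem.Chars.isIn_iff_infix,
    ← PySem.Chars.exists_prefix_drop_iff_isIn]
  exact not_exists

theorem pv_find_eq {s : List Char} {m : Nat} (hm : pvC <+: s.drop m)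
    (hmin : ∀ j < m, ¬ pvC <+: s.drop j) : PySem.Chars.find s pvC = (m : Int) := by
  have hne : PySem.Chars.find s pvC ≠ -1 := by
    rw [Ne, pv_no_occ_iff]
    intro hno
    exact hno m hm
  have hge : 0 ≤ PySem.Chars.find s pvC := by
    have := PySem.Chars.neg_one_le_find s pvC
    omega
  obtain ⟨hocc, hmin'⟩ := PySem.Chars.find_spec hge
  have heq : (PySem.Chars.find s pvC).toNat = m := by
    rcases Nat.lt_trichotomy (PySem.Chars.find s pvC).toNat m with h | h | h
    · exact absurd hocc (hmin _ h)
    · exact h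
    · exact absurd hm (hmin' m h)
  omega

theorem pv_no_overlap {s : List Char} {i j : Nat} (hi : pvC <+: s.drop i)
    (hj : pvC <+: s.drop j) (hij : i < j) : i + 6 ≤ j := by
  by_contra hcon
  obtain ⟨t, ht⟩ := hi
  obtain ⟨u, hu⟩ := hj
  have hd : s.drop j = (s.drop i).drop (j - i) := by
    rw [List.drop_drop]
    congr 1
    omega
  rw [← ht, ← hu] at hd
  rw [pvC_lit] at hd
  obtain h | h | h | h | h : j - i = 1 ∨ j - i = 2 ∨ j - i = 3 ∨ j - i = 4 ∨ j - i = 5 := by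
    omega
  all_goals rw [h] at hd; simp at hd

-- the recursive list of (absolute) match positions, stepping past each 6-char site
def pvOccRec (s : List Char) : List Nat :=
  if hf : PySem.Chars.find s pvC = -1 then []
  else
    have hge : 0 ≤ PySem.Chars.find s pvC := by
      have := PySem.Chars.neg_one_le_find s pvC
      omega
    have hocc := (PySem.Chars.find_spec hge).1
    have hlen := pv_occ_len_le hocc
    let m := (PySem.Chars.find s pvC).toNat
    m :: (pvOccRec (s.drop (m + 6))).map (· + (m + 6))
termination_by s.length
decreasing_by
  rw [List.length_drop]
  omega

theorem pvOccRec_none {s : List Char} (h : PySem.Chars.find s pvC = -1) : pvOccRec s = [] := by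
  rw [pvOccRec]
  simp [h]

theorem pvOccRec_some {s : List Char} {m : Nat} (hm : pvC <+: s.drop m)
    (hmin : ∀ j < m, ¬ pvC <+: s.drop j) :
    pvOccRec s = m :: (pvOccRec (s.drop (m + 6))).map (· + (m + 6)) := by
  have hf := pv_find_eq hm hmin
  rw [pvOccRec]
  have hne : ¬ PySem.Chars.find s pvC = -1 := by omega
  simp only [hne, dite_false]
  rw [hf]
  simp

-- splitOn.go unfolding lemmas
theorem pv_go_zero (l cur : List Char) (acc : List (List Char)) :
    PySem.Chars.splitOn.go pvC 0 l cur acc = ((cur.reverse ++ l) :: acc).reverse := by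
  rw [PySem.Chars.splitOn.go]

theorem pv_go_nil (n : Nat) (cur : List Char) (acc : List (List Char)) :
    PySem.Chars.splitOn.go pvC (n + 1) [] cur acc = (cur.reverse :: acc).reverse := by
  rw [PySem.Chars.splitOn.go]
  omega

theorem pv_go_cons (n : Nat) (x : Char) (rest cur : List Char) (acc : List (List Char)) :
    PySem.Chars.splitOn.go pvC (n + 1) (x :: rest) cur acc =
      if pvC.isPrefixOf (x :: rest) then
        PySem.Chars.splitOn.go pvC n ((x :: rest).drop pvC.length) [] (cur.reverse :: acc)
      else PySem.Chars.splitOn.go pvC n rest (x :: cur) acc := by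
  rw [PySem.Chars.splitOn.go]

theorem pv_go_acc (fuel : Nat) :
    ∀ (l cur : List Char) (acc : List (List Char)),
      PySem.Chars.splitOn.go pvC fuel l cur acc =
        acc.reverse ++ PySem.Chars.splitOn.go pvC fuel l cur [] := by
  induction fuel with
  | zero =>
    intro l cur acc
    rw [pv_go_zero, pv_go_zero]
    simp
  | succ n ih =>
    intro l cur acc
    cases l with
    | nil =>
      rw [pv_go_nil, pv_go_nil]
      simp
    | cons x rest =>
      rw [pv_go_cons, pv_go_cons]
      split_ifs with h
      · rw [ih _ [] (cur.reverse :: acc), ih _ [] [cur.reverse]]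
        simp
      · exact ih rest (x :: cur) acc

theorem pv_go_no_occ (fuel : Nat) :
    ∀ (l cur : List Char) (acc : List (List Char)),
      l.length < fuel → (∀ j, ¬ pvC <+: l.drop j) →
      PySem.Chars.splitOn.go pvC fuel l cur acc = ((cur.reverse ++ l) :: acc).reverse := by
  induction fuel with
  | zero => intro l cur acc h _; omega
  | succ n ih =>
    intro l cur acc hlt hno
    cases l with
    | nil => rw [pv_go_nil]; simp
    | cons x rest =>
      have h0 : ¬ pvC.isPrefixOf (x :: rest) := by
        rw [List.isPrefixOf_iff_prefix]
        exact hno 0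
      rw [pv_go_cons, if_neg h0, ih rest (x :: cur) acc (by simp at hlt ⊢; omega)
        (fun j => by have := hno (j + 1); rwa [List.drop_succ_cons] at this)]
      simp

theorem pv_go_first_occ (m : Nat) :
    ∀ (fuel : Nat) (l cur : List Char) (acc : List (List Char)),
      l.length < fuel → pvC <+: l.drop m → (∀ j < m, ¬ pvC <+: l.drop j) →
      PySem.Chars.splitOn.go pvC fuel l cur acc =
        PySem.Chars.splitOn.go pvC (fuel - (m + 1)) (l.drop (m + 6)) []
          ((cur.reverse ++ l.take m) :: acc) := by
  induction m with
  | zero =>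
    intro fuel l cur acc hlt hocc _
    have hlen := pv_occ_len_le hocc
    simp only [List.drop_zero] at hocc hlen
    cases fuel with
    | zero => omega
    | succ n =>
      cases l with
      | nil => simp at hlen
      | cons x rest =>
        rw [pv_go_cons, if_pos (List.isPrefixOf_iff_prefix.mpr hocc), pvC_len]
        simp
  | succ m ih =>
    intro fuel l cur acc hlt hocc hmin
    have hlen := pv_occ_len_le hocc
    cases fuel with
    | zero => omega
    | succ n =>
      cases l with
      | nil => simp at hlen
      | cons x rest =>
        have h0 : ¬ pvC.isPrefixOf (x :: rest) := by
          rw [List.isPrefixOf_iff_prefix]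
          exact hmin 0 (by omega)
        rw [pv_go_cons, if_neg h0,
          ih n rest (x :: cur) acc (by simp at hlt ⊢; omega)
            (by rwa [List.drop_succ_cons] at hocc)
            (fun j hj => by
              have := hmin (j + 1) (by omega)
              rwa [List.drop_succ_cons] at this)]
        have e1 : n - (m + 1) = n + 1 - (m + 1 + 1) := by omega
        have e2 : rest.drop (m + 6) = (x :: rest).drop (m + 1 + 6) := by
          rw [show m + 1 + 6 = (m + 6) + 1 by omega, List.drop_succ_cons]
        have e3 : (x :: cur).reverse ++ rest.take m = cur.reverse ++ (x :: rest).take (m + 1) := by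
          rw [List.take_succ_cons]
          simp
        rw [e1, e2, e3]

theorem pv_go_fuel_aux (N : Nat) :
    ∀ (l : List Char), l.length ≤ N →
      ∀ (fuel₁ fuel₂ : Nat) (cur : List Char) (acc : List (List Char)),
        l.length < fuel₁ → l.length < fuel₂ →
        PySem.Chars.splitOn.go pvC fuel₁ l cur acc = PySem.Chars.splitOn.go pvC fuel₂ l cur acc := by
  induction N using Nat.strong_induction_on with
  | _ N ih =>
    intro l hN fuel₁ fuel₂ cur acc h1 h2
    by_cases hf : PySem.Chars.find l pvC = -1
    · rw [pv_go_no_occ fuel₁ l cur acc h1 (pv_no_occ_iff.mp hf),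
        pv_go_no_occ fuel₂ l cur acc h2 (pv_no_occ_iff.mp hf)]
    · have hge : 0 ≤ PySem.Chars.find l pvC := by
        have := PySem.Chars.neg_one_le_find l pvC
        omega
      obtain ⟨hocc, hmin⟩ := PySem.Chars.find_spec hge
      set m := (PySem.Chars.find l pvC).toNat with hm
      have hlen := pv_occ_len_le hocc
      rw [pv_go_first_occ m fuel₁ l cur acc h1 hocc hmin,
        pv_go_first_occ m fuel₂ l cur acc h2 hocc hmin]
      have hdl : (l.drop (m + 6)).length = l.length - (m + 6) := by rw [List.length_drop]
      exact ih (l.length - (m + 6)) (by omega) _ (by omega) _ _ _ _ (by omega) (by omega)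

theorem pv_go_fuel {l : List Char} {fuel₁ fuel₂ : Nat} (cur : List Char) (acc : List (List Char))
    (h1 : l.length < fuel₁) (h2 : l.length < fuel₂) :
    PySem.Chars.splitOn.go pvC fuel₁ l cur acc = PySem.Chars.splitOn.go pvC fuel₂ l cur acc :=
  pv_go_fuel_aux l.length l le_rfl fuel₁ fuel₂ cur acc h1 h2

theorem pv_splitOn_no_occ {s : List Char} (h : ∀ j, ¬ pvC <+: s.drop j) :
    PySem.Chars.splitOn s pvC = [s] := by
  show PySem.Chars.splitOn.go pvC (s.length + 1) s [] [] = [s]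
  rw [pv_go_no_occ (s.length + 1) s [] [] (by omega) h]
  simp

theorem pv_splitOn_first_occ {s : List Char} {m : Nat} (hm : pvC <+: s.drop m)
    (hmin : ∀ j < m, ¬ pvC <+: s.drop j) :
    PySem.Chars.splitOn s pvC = s.take m :: PySem.Chars.splitOn (s.drop (m + 6)) pvC := by
  have hlen := pv_occ_len_le hm
  show PySem.Chars.splitOn.go pvC (s.length + 1) s [] [] = _
  rw [pv_go_first_occ m (s.length + 1) s [] [] (by omega) hm hmin]
  rw [pv_go_acc]
  simp only [List.reverse_nil, List.nil_append, List.reverse_cons]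
  rw [pv_go_fuel [] [] (by rw [List.length_drop]; omega) (by rw [List.length_drop]; omega)
    (fuel₂ := (s.drop (m + 6)).length + 1)]
  rfl

theorem pv_splitOn_ne_nil (s : List Char) : PySem.Chars.splitOn s pvC ≠ [] := by
  by_cases hf : PySem.Chars.find s pvC = -1
  · rw [pv_splitOn_no_occ (pv_no_occ_iff.mp hf)]
    simp
  · have hge : 0 ≤ PySem.Chars.find s pvC := by
      have := PySem.Chars.neg_one_le_find s pvC
      omega
    obtain ⟨hocc, hmin⟩ := PySem.Chars.find_spec hge
    rw [pv_splitOn_first_occ hocc hmin]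
    simp

-- the positions loop follows pvOccRec
theorem pv_posLoop_occ (fuel : Nat) :
    ∀ (s : List Char) (i : Nat) (acc : List Int),
      pvC <+: s.drop i → s.length - i < fuel →
      pvPosLoop fuel s pvC (i : Int) acc =
        acc ++ ((i :: (pvOccRec (s.drop (i + 6))).map (· + (i + 6))).map (fun n : Nat => (n : Int))) := by
  induction fuel with
  | zero =>
    intro s i acc hocc hlt
    have := pv_occ_len_le hocc
    omega
  | succ n ih =>
    intro s i acc hocc hlt
    have hil := pv_occ_len_le hocc
    rw [pvPosLoop, if_neg (by omega)]
    have h1 : (i : Int) + 1 = ((i + 1 : Nat) : Int) := by push_cast; ring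
    rw [h1, PySem.Chars.findFrom_natCast s pvC (i + 1) (by omega)]
    by_cases hf2 : PySem.Chars.find (s.drop (i + 1)) pvC = -1
    · rw [if_pos hf2]
      obtain ⟨n', rfl⟩ : ∃ n', n = n' + 1 := ⟨n - 1, by omega⟩
      rw [pvPosLoop, if_pos rfl]
      have hno : PySem.Chars.find (s.drop (i + 6)) pvC = -1 := by
        rw [pv_no_occ_iff] at hf2 ⊢
        intro j hj
        rw [List.drop_drop] at hj
        have := hf2 (5 + j)
        rw [List.drop_drop] at this
        exact this (by rwa [show i + 1 + (5 + j) = i + 6 + j by omega])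
      rw [pvOccRec_none hno]
      simp
    · rw [if_neg hf2]
      have hge2 : 0 ≤ PySem.Chars.find (s.drop (i + 1)) pvC := by
        have := PySem.Chars.neg_one_le_find (s.drop (i + 1)) pvC
        omega
      obtain ⟨hocc2, hmin2⟩ := PySem.Chars.find_spec hge2
      set m := (PySem.Chars.find (s.drop (i + 1)) pvC).toNat with hm
      have hocc2' : pvC <+: s.drop (i + 1 + m) := by
        rw [← List.drop_drop]
        exact hocc2
      have h56 : i + 6 ≤ i + 1 + m := pv_no_overlap hocc hocc2' (by omega)
      have hm5 : 5 ≤ m := by omega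
      have hocc6 : pvC <+: (s.drop (i + 6)).drop (m - 5) := by
        rw [List.drop_drop, show i + 6 + (m - 5) = i + 1 + m by omega]
        exact hocc2'
      have hmin6 : ∀ j < m - 5, ¬ pvC <+: (s.drop (i + 6)).drop j := by
        intro j hj hpre
        rw [List.drop_drop] at hpre
        have := hmin2 (5 + j) (by omega)
        rw [List.drop_drop] at this
        exact this (by rwa [show i + 1 + (5 + j) = i + 6 + j by omega])
      rw [pvOccRec_some hocc6 hmin6]
      have hr : ((i + 1 : Nat) : Int) + PySem.Chars.find (s.drop (i + 1)) pvC
          = ((i + 1 + m : Nat) : Int) := by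
        push_cast
        omega
      rw [hr, ih s (i + 1 + m) (acc ++ [(i : Int)]) hocc2' (by omega)]
      have e0 : i + 6 + (m - 5 + 6) = i + 1 + m + 6 := by omega
      rw [List.drop_drop, e0]
      simp only [List.map_cons, List.map_map]
      have e1 : m - 5 + (i + 6) = i + 1 + m := by omega
      rw [e1]
      have e2 : ((fun n : Nat => (n : Int)) ∘ ((fun x : Nat => x + (i + 6)) ∘ (fun x : Nat => x + (m - 5 + 6))))
          = ((fun n : Nat => (n : Int)) ∘ (fun x : Nat => x + (i + 1 + m + 6))) := by
        funext a
        simp only [Function.comp_apply]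
        congr 1
        omega
      rw [e2]
      simp [List.append_assoc]

theorem pv_positions_eq (s : List Char) :
    pvPosLoop (s.length + 1) s pvC (PySem.Chars.find s pvC) [] =
      (pvOccRec s).map (fun n : Nat => (n : Int)) := by
  by_cases hf : PySem.Chars.find s pvC = -1
  · rw [hf, pvOccRec_none hf, pvPosLoop, if_pos rfl]
    simp
  · have hge : 0 ≤ PySem.Chars.find s pvC := by
      have := PySem.Chars.neg_one_le_find s pvC
      omega
    obtain ⟨hocc, hmin⟩ := PySem.Chars.find_spec hge
    set m := (PySem.Chars.find s pvC).toNat with hm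
    have hfm : PySem.Chars.find s pvC = (m : Int) := by omega
    rw [hfm, pv_posLoop_occ (s.length + 1) s m [] hocc (by omega), pvOccRec_some hocc hmin]
    simp

-- the fragment-building foldl: accumulated prefix splits off
theorem pv_foldl_step (ps : List Int) :
    ∀ (f : List Int) (st : Int),
      ps.foldl (fun st pos => (st.1 ++ [pos - st.2], pos + 6)) (f, st) =
        (f ++ (ps.foldl (fun st pos => (st.1 ++ [pos - st.2], pos + 6)) ([], st)).1,
         (ps.foldl (fun st pos => (st.1 ++ [pos - st.2], pos + 6)) ([], st)).2) := by
  induction ps with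
  | nil => intro f st; simp
  | cons p ps ih =>
    intro f st
    simp only [List.foldl_cons]
    rw [ih (f ++ [p - st]) (p + 6), ih ([] ++ [p - st]) (p + 6)]
    simp

theorem pv_frags_aux (N : Nat) :
    ∀ (s : List Char), s.length ≤ N → ∀ (d : Nat),
      (((pvOccRec s).map (fun n : Nat => ((n + d : Nat) : Int))).foldl
          (fun st pos => (st.1 ++ [pos - st.2], pos + 6)) ([], (d : Int))).1
        ++ [((d + s.length : Nat) : Int) -
            (((pvOccRec s).map (fun n : Nat => ((n + d : Nat) : Int))).foldl
              (fun st pos => (st.1 ++ [pos - st.2], pos + 6)) ([], (d : Int))).2]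
      = (PySem.Chars.splitOn s pvC).map (fun q => (q.length : Int)) := by
  induction N using Nat.strong_induction_on with
  | _ N ih =>
    intro s hN d
    by_cases hf : PySem.Chars.find s pvC = -1
    · rw [pvOccRec_none hf, pv_splitOn_no_occ (pv_no_occ_iff.mp hf)]
      simp only [List.map_nil, List.foldl_nil, List.nil_append, List.map_cons, List.map_nil]
      congr 1
      push_cast
      ring
    · have hge : 0 ≤ PySem.Chars.find s pvC := by
        have := PySem.Chars.neg_one_le_find s pvC
        omega
      obtain ⟨hocc, hmin⟩ := PySem.Chars.find_spec hge
      set m := (PySem.Chars.find s pvC).toNat with hm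
      have hlen := pv_occ_len_le hocc
      rw [pvOccRec_some hocc hmin, pv_splitOn_first_occ hocc hmin]
      simp only [List.map_cons, List.foldl_cons, List.map_map, List.nil_append]
      have hcast : ((m + d : Nat) : Int) + 6 = ((d + m + 6 : Nat) : Int) := by push_cast; ring
      have hfun : ((fun n : Nat => ((n + d : Nat) : Int)) ∘ (· + (m + 6)))
          = (fun n : Nat => ((n + (d + m + 6) : Nat) : Int)) := by
        funext a
        simp only [Function.comp_apply]
        congr 1
        omega
      rw [pv_foldl_step, hcast, hfun]
      have hrec := ih (s.length - (m + 6)) (by omega) (s.drop (m + 6))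
        (by rw [List.length_drop]) (d + m + 6)
      rw [List.length_drop] at hrec
      have htot : ((d + s.length : Nat) : Int) = ((d + m + 6 + (s.length - (m + 6)) : Nat) : Int) := by
        congr 1
        omega
      rw [htot, List.append_assoc, hrec]
      have hml : (s.take m).length = m := by
        rw [List.length_take]
        omega
      have he : ((m + d : Nat) : Int) - (d : Int) = ((m : Nat) : Int) := by
        push_cast
        ring
      rw [hml, he]
      simp

theorem pv_frags_eq (s : List Char) :
    (((pvOccRec s).map (fun n : Nat => (n : Int))).foldl
        (fun st pos => (st.1 ++ [pos - st.2], pos + 6)) ([], (0 : Int))).1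
      ++ [((s.length : Nat) : Int) -
          (((pvOccRec s).map (fun n : Nat => (n : Int))).foldl
            (fun st pos => (st.1 ++ [pos - st.2], pos + 6)) ([], (0 : Int))).2]
    = (PySem.Chars.splitOn s pvC).map (fun q => (q.length : Int)) := by
  have h := pv_frags_aux s.length s le_rfl 0
  simp only [Nat.add_zero, Nat.zero_add, Nat.cast_zero] at h
  exact h

-- ===== VERDICT (by name: the statement is the Claim_ definition above) =====
theorem digest_ecori_spec : Claim_equal_digest_ecori := by
  intro seq _
  show digest_ecori seq = digest_ecori_alt seq
  unfold digest_ecori digest_ecori_alt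
  rw [show "GAATTC".toList = pvC from rfl]
  simp only [pvC_len]
  set s := seq.toList with hs
  rw [pv_positions_eq s]
  by_cases hf : PySem.Chars.find s pvC = -1
  · rw [pvOccRec_none hf, pv_splitOn_no_occ (pv_no_occ_iff.mp hf)]
    simp
  · have hge : 0 ≤ PySem.Chars.find s pvC := by
      have := PySem.Chars.neg_one_le_find s pvC
      omega
    obtain ⟨hocc, hmin⟩ := PySem.Chars.find_spec hge
    set m := (PySem.Chars.find s pvC).toNat with hm
    rw [pvOccRec_some hocc hmin]
    have hne2 : (PySem.Chars.splitOn s pvC).length ≠ 1 := by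
      rw [pv_splitOn_first_occ hocc hmin]
      have := pv_splitOn_ne_nil (s.drop (m + 6))
      simp only [List.length_cons]
      intro h
      exact this (List.length_eq_zero_iff.mp (by omega))
    rw [← pvOccRec_some hocc hmin]
    simp only [List.isEmpty_iff]
    rw [if_neg (by rw [pvOccRec_some hocc hmin]; simp), if_neg hne2]
    have hfold := pv_frags_eq s
    simp only [Nat.cast_ofNat]
    rw [hfold]
    rw [List.filter_map]
    congr 1
    apply List.filter_congr
    intro p _
    simp [Function.comp, Int.natCast_pos]
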